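-- pv_equiv track=rewrite | github.com/eryknguyen-infjt/sefl-taught_Python | factor_pri.py | sumPrimes_ofK
-- ===== SOURCE A (Python) =====
-- from math import sqrt
--
-- def is_prime(n):
--     if n < 2:
--         return False
--     for i in range(2, int(sqrt(n)) + 1):
--         if n % i == 0:
--             return False
--     return True
--
-- def find_prime_pairs(k):
--     prime_pairs = []
--     for a in range(2, k):
--         if is_prime(a):
--             b = k - a
--             if is_prime(b):
--                 prime_pairs.append((a, b))
--     return prime_pairs
--
-- def sumPrimes_ofK(test_cases):
--     results = []
--     for k in test_cases:
--         prime_pairs = find_prime_pairs(k)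
--         if prime_pairs:
--             results.append(f"{k} = {prime_pairs[0][0]} + {prime_pairs[0][1]}")
--         else:
--             results.append(f"{k} = NO SOLUTION")
--     return results
-- ===== SOURCE B (Python) =====
-- def _is_prime(n):
--     if n < 2:
--         return False
--     if n % 2 == 0:
--         return n == 2
--     d = 3
--     while d * d <= n:
--         if n % d == 0:
--             return False
--         d += 2
--     return True
--
-- def sumPrimes_ofK(test_cases):
--     results = []
--     for k in test_cases:
--         a = 2
--         pair = None
--         while a < k:
--             if _is_prime(a) and _is_prime(k - a):
--                 pair = (a, k - a)
--                 break
--             a += 1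
--         if pair is not None:
--             results.append(f"{k} = {pair[0]} + {pair[1]}")
--         else:
--             results.append(f"{k} = NO SOLUTION")
--     return results
-- ===== Notes on version B (the rewrite author's own statement) =====
-- stated objective: faster
-- what changed: A enumerates every prime pair (a, k-a) for each k with a full-range sqrt-bounded trial division before taking the first pair; B stops at the first valid pair (early exit) and tests primality by odd-only trial division with d*d <= n.
import Mathlib
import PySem

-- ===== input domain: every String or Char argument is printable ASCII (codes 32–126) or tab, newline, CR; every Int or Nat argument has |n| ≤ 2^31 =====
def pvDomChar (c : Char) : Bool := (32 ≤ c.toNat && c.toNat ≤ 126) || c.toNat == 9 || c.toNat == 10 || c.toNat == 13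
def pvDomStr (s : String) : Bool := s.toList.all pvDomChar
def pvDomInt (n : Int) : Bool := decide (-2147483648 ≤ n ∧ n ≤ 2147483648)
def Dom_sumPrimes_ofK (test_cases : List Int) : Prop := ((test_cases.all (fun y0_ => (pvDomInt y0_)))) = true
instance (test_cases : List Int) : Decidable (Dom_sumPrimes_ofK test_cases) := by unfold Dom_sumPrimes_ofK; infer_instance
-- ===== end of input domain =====

-- B replaces A's full enumeration of all prime pairs per k by an early-exit search for the
-- first pair, with an odd-only trial-division prime test (objective: faster, constant-factor).


-- ===== PORT A =====
-- is_prime: trial division over range(2, int(sqrt(n))+1).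
-- int(sqrt(n)) is ported as Nat.sqrt n.toNat: exact for 0 ≤ n ≤ 2^31 (double sqrt rounds to isqrt there).
def isPrimeA (n : Int) : Bool :=
  if n < 2 then false
  else (PySem.List.pyRange 2 ((Nat.sqrt n.toNat : Int) + 1) 1).all
         (fun i => !(PySem.Int.mod n i == 0))

-- find_prime_pairs
def findPrimePairsA (k : Int) : List (Int × Int) :=
  (PySem.List.pyRange 2 k 1).foldl
    (fun acc a =>
      if isPrimeA a then
        let b := k - a
        if isPrimeA b then acc ++ [(a, b)] else acc
      else acc) []

def sumPrimes_ofK (test_cases : List Int) : List String :=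
  test_cases.foldl
    (fun results k =>
      let prime_pairs := findPrimePairsA k
      match prime_pairs with
      | (a, b) :: _ =>
          results ++ [PySem.Int.toStr k ++ " = " ++ PySem.Int.toStr a ++ " + " ++ PySem.Int.toStr b]
      | [] => results ++ [PySem.Int.toStr k ++ " = NO SOLUTION"]) []

-- ===== PORT B =====
-- _is_prime's while-loop over odd trial divisors d = 3, 5, 7, … with d*d <= n
def oddLoopB (n d : Int) : Bool :=
  if h : d * d ≤ n then
    if PySem.Int.mod n d == 0 then false else oddLoopB n (d + 2)
  else true
termination_by (n + 1 - d).toNat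
decreasing_by
  have hd : d ≤ n := by
    by_cases h0 : d ≤ 0
    · have := mul_self_nonneg d; omega
    · have : d * 1 ≤ d * d := by
        apply mul_le_mul_of_nonneg_left <;> omega
      omega
  omega

def isPrimeB (n : Int) : Bool :=
  if n < 2 then false
  else if PySem.Int.mod n 2 == 0 then n == 2
  else oddLoopB n 3

-- the while-loop over a = 2, 3, … < k, breaking at the first prime pair
def findPairB (k a : Int) : Option (Int × Int) :=
  if h : a < k then
    if isPrimeB a && isPrimeB (k - a) then some (a, k - a)
    else findPairB k (a + 1)
  else none
termination_by (k - a).toNat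
decreasing_by omega

def sumPrimes_ofK_alt (test_cases : List Int) : List String :=
  test_cases.foldl
    (fun results k =>
      match findPairB k 2 with
      | some (a, b) =>
          results ++ [PySem.Int.toStr k ++ " = " ++ PySem.Int.toStr a ++ " + " ++ PySem.Int.toStr b]
      | none => results ++ [PySem.Int.toStr k ++ " = NO SOLUTION"]) []

-- ===== PRECONDITION & SPEC =====
def Spec_sumPrimes_ofK (test_cases : List Int) (out : List String) : Prop := out = sumPrimes_ofK_alt test_cases
instance (test_cases : List Int) (out : List String) : Decidable (Spec_sumPrimes_ofK test_cases out) := by unfold Spec_sumPrimes_ofK; infer_instance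

-- ===== CLAIM (what is proved, stated in full; the proofs are below) =====
def Claim_equal_sumPrimes_ofK : Prop := ∀ (test_cases : List Int), Dom_sumPrimes_ofK test_cases → Spec_sumPrimes_ofK test_cases (sumPrimes_ofK test_cases)

-- ===== LEMMAS AND PROOFS =====

-- primality of n.toNat, phrased over Int trial divisors
lemma prime_iff_noDiv (n : Int) (hn : 2 ≤ n) :
    Nat.Prime n.toNat ↔ ∀ i : Int, 2 ≤ i → i * i ≤ n → ¬ i ∣ n := by
  have hc : ((n.toNat : Int)) = n := Int.toNat_of_nonneg (by omega)
  rw [Nat.prime_def_le_sqrt]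
  constructor
  · rintro ⟨-, h⟩ i hi2 hii hdvd
    have hj : (i.toNat : Int) = i := Int.toNat_of_nonneg (by omega)
    refine h i.toNat (by omega) ?_ ?_
    · rw [Nat.le_sqrt]
      have : (↑(i.toNat * i.toNat) : Int) ≤ (n.toNat : Int) := by push_cast [hj, hc]; exact hii
      exact_mod_cast this
    · rw [← Int.natCast_dvd_natCast, hj, hc] at *; exact hdvd
  · intro h
    refine ⟨by omega, fun m hm2 hms hdvd => ?_⟩
    refine h (m : Int) (by exact_mod_cast hm2) ?_ ?_
    · rw [Nat.le_sqrt] at hms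
      calc ((m : Int) * m) = ((m * m : Nat) : Int) := by push_cast; ring
        _ ≤ ((n.toNat : Nat) : Int) := by exact_mod_cast hms
        _ = n := hc
    · rw [← hc]; exact_mod_cast hdvd

-- A's trial division decides primality of n.toNat (for n < 2 both sides are false)
lemma isPrimeA_iff (n : Int) : isPrimeA n = true ↔ (2 ≤ n ∧ Nat.Prime n.toNat) := by
  unfold isPrimeA
  by_cases hn : n < 2
  · simp only [if_pos hn, Bool.false_eq_true, false_iff, not_and]
    intro h; omega
  · have hn2 : 2 ≤ n := by omega
    have hc : ((n.toNat : Int)) = n := Int.toNat_of_nonneg (by omega)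
    have key : ∀ i : Int, 2 ≤ i → (i * i ≤ n ↔ i < (Nat.sqrt n.toNat : Int) + 1) := by
      intro i hi
      have hj : (i.toNat : Int) = i := Int.toNat_of_nonneg (by omega)
      constructor
      · intro h
        have hnat : i.toNat * i.toNat ≤ n.toNat := by
          have : (↑(i.toNat * i.toNat) : Int) ≤ (n.toNat : Int) := by push_cast [hj, hc]; exact h
          exact_mod_cast this
        have := Nat.le_sqrt.mpr hnat
        omega
      · intro h
        have hsq : i.toNat ≤ Nat.sqrt n.toNat := by omega
        have hnat := Nat.le_sqrt.mp hsq
        have : (↑(i.toNat * i.toNat) : Int) ≤ (n.toNat : Int) := by exact_mod_cast hnat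
        rw [hc] at this; push_cast [hj] at this; exact this
    rw [if_neg hn, prime_iff_noDiv n hn2]
    simp only [List.all_eq_true, PySem.List.mem_pyRange_one, Bool.not_eq_eq_eq_not,
      Bool.not_true, beq_eq_false_iff_ne, ne_eq]
    constructor
    · intro h
      refine ⟨hn2, fun i hi2 hii hdvd => ?_⟩
      have hm := h i ⟨hi2, (key i hi2).mp hii⟩
      exact hm ((PySem.Int.mod_eq_zero_iff_dvd n i).mpr hdvd)
    · rintro ⟨-, h⟩ i ⟨hi2, hilt⟩ hmod
      exact h i hi2 ((key i hi2).mpr hilt) ((PySem.Int.mod_eq_zero_iff_dvd n i).mp hmod)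

-- the invariant of B's odd-divisor while-loop
lemma oddLoopB_iff (n : Int) (hodd : n % 2 = 1) :
    ∀ (m : Nat) (d : Int), 3 ≤ d → d % 2 = 1 → (n + 1 - d).toNat ≤ m →
      (oddLoopB n d = true ↔ ∀ e : Int, d ≤ e → e * e ≤ n → ¬ e ∣ n) := by
  intro m
  induction m with
  | zero =>
    intro d hd3 hd2 hm
    have hdn : n + 1 ≤ d := by omega
    rw [oddLoopB]
    have hno : ¬ (d * d ≤ n) := by nlinarith
    rw [dif_neg hno]
    simp only [true_iff]
    intro e he hee hdvd
    nlinarith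
  | succ m ih =>
    intro d hd3 hd2 hm
    rw [oddLoopB]
    by_cases hdd : d * d ≤ n
    · rw [dif_pos hdd]
      by_cases hmod : PySem.Int.mod n d = 0
      · rw [if_pos (by simp [hmod])]
        simp only [Bool.false_eq_true, false_iff, not_forall]
        exact ⟨d, le_rfl, hdd, fun h => h ((PySem.Int.mod_eq_zero_iff_dvd n d).mp hmod)⟩
      · have hdn : d ≤ n := by nlinarith
        rw [if_neg (by simp [hmod]), ih (d + 2) (by omega) (by omega) (by omega)]
        constructor
        · intro h e he hee hdvd
          rcases eq_or_lt_of_le he with heq | hlt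
          · rw [← heq] at hdvd
            exact hmod ((PySem.Int.mod_eq_zero_iff_dvd n d).mpr hdvd)
          · rcases eq_or_lt_of_le (by omega : d + 1 ≤ e) with he1 | he2
            · have h2 : (2 : Int) ∣ e := by omega
              have : (2 : Int) ∣ n := h2.trans hdvd
              omega
            · exact h e (by omega) hee hdvd
        · intro h e he hee hdvd
          exact h e (by omega) hee hdvd
    · rw [dif_neg hdd]
      simp only [true_iff]
      intro e he hee hdvd
      have : d * d ≤ e * e := mul_le_mul he he (by omega) (by omega)
      omega

-- B's test decides the same predicate as A's
lemma isPrimeB_iff (n : Int) : isPrimeB n = true ↔ (2 ≤ n ∧ Nat.Prime n.toNat) := by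
  unfold isPrimeB
  by_cases hn : n < 2
  · simp only [if_pos hn, Bool.false_eq_true, false_iff, not_and]
    intro h; omega
  · have hn2 : 2 ≤ n := by omega
    rw [if_neg hn, PySem.Int.mod_eq_emod_of_pos (show (0:Int) < 2 by omega)]
    by_cases hev : n % 2 = 0
    · rw [if_pos (by simp [hev]), prime_iff_noDiv n hn2]
      simp only [beq_iff_eq]
      constructor
      · rintro rfl
        refine ⟨by omega, fun i hi2 hii hdvd => ?_⟩
        have : i ≤ 1 := by nlinarith
        omega
      · rintro ⟨-, h⟩
        by_contra hne
        exact h 2 le_rfl (by omega) (by omega)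
    · have hodd : n % 2 = 1 := by omega
      rw [if_neg (by simp [hev]), prime_iff_noDiv n hn2,
        oddLoopB_iff n hodd (n + 1 - 3).toNat 3 (by omega) (by omega) le_rfl]
      constructor
      · intro h
        refine ⟨hn2, fun i hi2 hii hdvd => ?_⟩
        rcases eq_or_lt_of_le hi2 with rfl | hi3
        · omega
        · exact h i (by omega) hii hdvd
      · rintro ⟨-, h⟩ e he hee hdvd
        exact h e (by omega) hee hdvd

lemma isPrime_eq (n : Int) : isPrimeA n = isPrimeB n := by
  by_cases h : 2 ≤ n ∧ Nat.Prime n.toNat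
  · rw [(isPrimeA_iff n).mpr h, (isPrimeB_iff n).mpr h]
  · rcases Bool.eq_false_or_eq_true (isPrimeA n) with ha | ha <;>
      rcases Bool.eq_false_or_eq_true (isPrimeB n) with hb | hb <;>
      simp_all [isPrimeA_iff, isPrimeB_iff]

-- A's pair list as a flatMap
lemma findPrimePairsA_eq (k : Int) :
    findPrimePairsA k = (PySem.List.pyRange 2 k 1).flatMap
      (fun a => if isPrimeA a && isPrimeA (k - a) then [(a, k - a)] else []) := by
  unfold findPrimePairsA
  have hstep : (fun (acc : List (Int × Int)) (a : Int) =>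
      if isPrimeA a then
        let b := k - a
        if isPrimeA b then acc ++ [(a, b)] else acc
      else acc) = fun acc a =>
        acc ++ (if isPrimeA a && isPrimeA (k - a) then [(a, k - a)] else []) := by
    funext acc a
    by_cases h1 : isPrimeA a <;> by_cases h2 : isPrimeA (k - a) <;> simp [h1, h2]
  rw [hstep, PySem.List.foldl_append_eq_flatMap]
  simp

-- B's search returns the head of that flatMap, from any start a
lemma findPairB_head (k : Int) :
    ∀ (m : Nat) (a : Int), (k - a).toNat ≤ m →
      findPairB k a = ((PySem.List.pyRange a k 1).flatMap
        (fun x => if isPrimeA x && isPrimeA (k - x) then [(x, k - x)] else [])).head? := by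
  intro m
  induction m with
  | zero =>
    intro a hm
    rw [findPairB, dif_neg (by omega : ¬ a < k), PySem.List.pyRange_one_eq_nil (by omega)]
    rfl
  | succ m ih =>
    intro a hm
    by_cases hak : a < k
    · rw [findPairB, dif_pos hak, PySem.List.pyRange_one_cons hak, List.flatMap_cons]
      rw [isPrime_eq a, isPrime_eq (k - a)]
      by_cases hc : isPrimeB a && isPrimeB (k - a)
      · rw [if_pos hc, if_pos hc]; rfl
      · rw [if_neg hc, if_neg hc, List.nil_append, ih (a + 1) (by omega)]
    · rw [findPairB, dif_neg hak, PySem.List.pyRange_one_eq_nil (by omega)]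
      rfl

-- B's search returns the head of A's pair list
lemma findPairB_eq_head (k : Int) : findPairB k 2 = (findPrimePairsA k).head? := by
  rw [findPrimePairsA_eq, findPairB_head k (k - 2).toNat 2 le_rfl]

-- per-element agreement lifted through the two output folds
lemma fold_eq (l : List Int) :
    ∀ (acc : List String),
      l.foldl (fun results k =>
        let prime_pairs := findPrimePairsA k
        match prime_pairs with
        | (a, b) :: _ =>
            results ++ [PySem.Int.toStr k ++ " = " ++ PySem.Int.toStr a ++ " + " ++ PySem.Int.toStr b]
        | [] => results ++ [PySem.Int.toStr k ++ " = NO SOLUTION"]) acc =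
      l.foldl (fun results k =>
        match findPairB k 2 with
        | some (a, b) =>
            results ++ [PySem.Int.toStr k ++ " = " ++ PySem.Int.toStr a ++ " + " ++ PySem.Int.toStr b]
        | none => results ++ [PySem.Int.toStr k ++ " = NO SOLUTION"]) acc := by
  induction l with
  | nil => intro acc; rfl
  | cons k l ih =>
    intro acc
    simp only [List.foldl_cons]
    rw [findPairB_eq_head k]
    cases h : findPrimePairsA k with
    | nil => exact ih _
    | cons p rest => cases p; exact ih _

-- ===== VERDICT (by name: the statement is the Claim_ definition above) =====
theorem sumPrimes_ofK_spec : Claim_equal_sumPrimes_ofK := by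
  intro tc _
  unfold Spec_sumPrimes_ofK sumPrimes_ofK sumPrimes_ofK_alt
  exact fold_eq tc []
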